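-- pv_equiv track=rewrite | github.com/MarsWilliams/practice | practice/travis/fibonacci.py | fib_members
-- ===== SOURCE A (Python) =====
-- from typing import List
--
-- def fib_members(n: int) -> List[int]:
--     """Given a whole number n, return a list of n+1 booleans where each item in the list represents if its 0-index is a Fibonacci number.
--     6 -> [True, True, True, True, False, True, False]"""
--
--     fibs = set()
--
--     current = 0
--     proxima = 1
--
--     while current <= n:
--         fibs.add(current)
--         current, proxima = proxima, current + proxima
--
--     return [x in fibs for x in range(n+1)]
-- ===== SOURCE B (Python) =====
-- def fib_members(n: int):
--     # Build the answer as concatenated runs: for each Fibonacci number a <= n,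
--     # emit [True] followed by the gap of Falses up to the next Fibonacci number.
--     def build(a, b):
--         # a is a Fibonacci number with a <= n; b is the next larger Fibonacci number
--         if b > n:
--             return [True] + [False] * (n - a)
--         return [True] + [False] * (b - a - 1) + build(b, a + b)
--     if n < 0:
--         return []
--     if n == 0:
--         return [True]
--     return [True] + build(1, 2)
-- ===== Notes on version B (the rewrite author's own statement) =====
-- stated objective: alternative
-- what changed: B builds the output recursively as concatenated runs ([True] then a block of Falses) between consecutive Fibonacci numbers, instead of collecting a set of Fibonacci numbers and then scanning every index with a membership test.
import Mathlib
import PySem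

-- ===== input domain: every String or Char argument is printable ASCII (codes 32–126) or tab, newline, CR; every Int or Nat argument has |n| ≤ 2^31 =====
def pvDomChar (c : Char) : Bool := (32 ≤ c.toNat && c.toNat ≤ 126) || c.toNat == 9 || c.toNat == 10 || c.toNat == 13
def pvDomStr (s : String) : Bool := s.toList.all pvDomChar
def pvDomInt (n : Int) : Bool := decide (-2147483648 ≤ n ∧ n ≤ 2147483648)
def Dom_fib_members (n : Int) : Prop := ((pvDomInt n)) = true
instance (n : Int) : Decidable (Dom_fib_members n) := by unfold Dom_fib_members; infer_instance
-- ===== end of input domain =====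

-- B builds the output recursively as concatenated runs between consecutive Fibonacci
-- numbers instead of building a set and testing every index; alternative decomposition.

-- ===== PORT A =====
-- A's 'while current <= n' loop collecting the set; the invariants 0 ≤ current and
-- 1 ≤ proxima (true of the initial state 0, 1) are carried only to justify termination
def fibLoopA (n current proxima : Int) (fibs : PySem.Set Int)
    (hc : 0 ≤ current) (hp : 1 ≤ proxima) : PySem.Set Int :=
  if h : current ≤ n then
    fibLoopA n proxima (current + proxima) (PySem.Set.add fibs current)
      (by omega) (by omega)
  else fibs
termination_by ((n + 1 - current).toNat + (n + 1 - proxima).toNat)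
decreasing_by omega

def fib_members (n : Int) : List Bool :=
  let fibs := fibLoopA n 0 1 PySem.Set.empty (by omega) (by omega)
  (PySem.List.pyRange 0 (n + 1) 1).map (fun x => PySem.Set.contains fibs x)

-- ===== PORT B =====
-- B's helper build(a, b): a is a Fibonacci number ≤ n, b the next larger one; the
-- invariants 1 ≤ a < b, a ≤ n (true at every call in Source B) justify termination
def buildB (n a b : Int) (h1 : 1 ≤ a) (h2 : a < b) (_ha : a ≤ n) : List Bool :=
  if h : b > n then
    true :: PySem.List.pyRepeat [false] (n - a)
  else
    (true :: PySem.List.pyRepeat [false] (b - a - 1))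
      ++ buildB n b (a + b) (by omega) (by omega) (by omega)
termination_by (n - a).toNat
decreasing_by omega

def fib_members_alt (n : Int) : List Bool :=
  if _h0 : n < 0 then []
  else if _h1 : n = 0 then [true]
  else true :: buildB n 1 2 (by omega) (by omega) (by omega)

-- ===== PRECONDITION & SPEC =====
def Spec_fib_members (n : Int) (out : List Bool) : Prop := out = fib_members_alt n
instance (n : Int) (out : List Bool) : Decidable (Spec_fib_members n out) := by unfold Spec_fib_members; infer_instance

-- ===== CLAIM (what is proved, stated in full; the proofs are below) =====
def Claim_equal_fib_members : Prop := ∀ (n : Int), Dom_fib_members n → Spec_fib_members n (fib_members n)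

-- ===== LEMMAS AND PROOFS =====

-- reference predicate: x occurs in the chain c, p, c+p, … truncated at n
def chainMem (n c p x : Int) (hc : 0 ≤ c) (hp : 1 ≤ p) : Bool :=
  if h : c ≤ n then
    (x == c) || chainMem n p (c + p) x (by omega) (by omega)
  else false
termination_by ((n + 1 - c).toNat + (n + 1 - p).toNat)
decreasing_by omega

-- membership in A's final set = membership in the start set or in the chain
theorem contains_fibLoopA (n : Int) (m : Nat) :
    ∀ (c p : Int) (S : PySem.Set Int) (x : Int) (hc : 0 ≤ c) (hp : 1 ≤ p),
      (n + 1 - c).toNat + (n + 1 - p).toNat = m →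
      PySem.Set.contains (fibLoopA n c p S hc hp) x
        = (PySem.Set.contains S x || chainMem n c p x hc hp) := by
  induction m using Nat.strong_induction_on with
  | _ m ih =>
    intro c p S x hc hp hm
    rw [fibLoopA, chainMem]
    by_cases h : c ≤ n
    · rw [dif_pos h, dif_pos h,
        ih ((n + 1 - p).toNat + (n + 1 - (c + p)).toNat) (by omega) p (c + p) _ x
          (by omega) (by omega) rfl]
      have hadd : PySem.Set.contains (PySem.Set.add S c) x
          = (PySem.Set.contains S x || (x == c)) := by
        rw [Bool.eq_iff_iff]
        simp only [Bool.or_eq_true, PySem.Set.contains_iff, PySem.Set.mem_add, beq_iff_eq]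
      rw [hadd]
      rw [Bool.or_assoc]
    · rw [dif_neg h, dif_neg h]
      simp

-- chain values are ≥ c (given c ≤ p), so smaller x are not members
theorem chainMem_lt (n : Int) (m : Nat) :
    ∀ (c p x : Int) (hc : 0 ≤ c) (hp : 1 ≤ p),
      (n + 1 - c).toNat + (n + 1 - p).toNat = m →
      c ≤ p → x < c → chainMem n c p x hc hp = false := by
  induction m using Nat.strong_induction_on with
  | _ m ih =>
    intro c p x hc hp hm hcp hx
    rw [chainMem]
    by_cases h : c ≤ n
    · rw [dif_pos h]
      rw [ih ((n + 1 - p).toNat + (n + 1 - (c + p)).toNat) (by omega) p (c + p) x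
          (by omega) (by omega) rfl (by omega) (by omega)]
      simp
      omega
    · rw [dif_neg h]

-- chainMem depends only on the numeric arguments (proof irrelevance)
theorem chainMem_congr (n c c' p p' x : Int) (hc : 0 ≤ c) (hp : 1 ≤ p)
    (hc' : 0 ≤ c') (hp' : 1 ≤ p') (e1 : c = c') (e2 : p = p') :
    chainMem n c p x hc hp = chainMem n c' p' x hc' hp' := by
  subst e1; subst e2; rfl

-- a run of k Falses: the mapped range is constantly false when the function is
theorem map_false_run (a b : Int) (f : Int → Bool)
    (hf : ∀ x, a ≤ x → x < b → f x = false) :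
    (PySem.List.pyRange a b 1).map f = PySem.List.pyRepeat [false] (b - a) := by
  rw [PySem.List.pyRepeat_singleton]
  apply List.ext_getElem
  · simp [PySem.List.length_pyRange_one]
  · intro k h1 h2
    simp only [List.length_map, PySem.List.length_pyRange_one] at h1
    simp only [List.getElem_map, PySem.List.getElem_pyRange_one, List.getElem_replicate]
    exact hf _ (by omega) (by omega)

-- B's build equals the chain-membership map over the index range [a, n]
theorem buildB_eq (n : Int) (m : Nat) :
    ∀ (a b : Int) (h1 : 1 ≤ a) (h2 : a < b) (ha : a ≤ n),
      (n - a).toNat = m →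
      buildB n a b h1 h2 ha
        = (PySem.List.pyRange a (n + 1) 1).map
            (fun x => chainMem n a b x (by omega) (by omega)) := by
  induction m using Nat.strong_induction_on with
  | _ m ih =>
    intro a b h1 h2 ha hm
    have hhead : chainMem n a b a (by omega) (by omega) = true := by
      rw [chainMem, dif_pos ha]; simp
    have htail : ∀ x, a < x → chainMem n a b x (by omega) (by omega)
        = chainMem n b (a + b) x (by omega) (by omega) := by
      intro x hx
      rw [chainMem, dif_pos ha]
      simp [show ¬ (x = a) by omega]
    rw [buildB]
    by_cases h : b > n
    · rw [dif_pos h]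
      rw [PySem.List.pyRange_one_cons (by omega), List.map_cons, hhead]
      congr 1
      rw [map_false_run (a + 1) (n + 1) _ ?_]
      · congr 1; omega
      · intro x hx1 hx2
        rw [htail x (by omega)]
        exact chainMem_lt n _ b (a + b) x (by omega) (by omega) rfl (by omega) (by omega)
    · rw [dif_neg h]
      rw [PySem.List.pyRange_one_append a b (n + 1) (by omega) (by omega), List.map_append]
      congr 1
      · rw [PySem.List.pyRange_one_cons (by omega), List.map_cons, hhead]
        congr 1
        rw [map_false_run (a + 1) b _ ?_]
        · congr 1; omega
        · intro x hx1 hx2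
          rw [htail x (by omega)]
          exact chainMem_lt n _ b (a + b) x (by omega) (by omega) rfl (by omega) (by omega)
      · rw [ih (n - b).toNat (by omega) b (a + b) (by omega) (by omega) (by omega) rfl]
        apply List.map_congr_left
        intro x hx
        rw [PySem.List.mem_pyRange_one] at hx
        exact (htail x (by omega)).symm

-- ===== VERDICT (by name: the statement is the Claim_ definition above) =====
theorem fib_members_spec : Claim_equal_fib_members := by
  intro n _
  unfold Spec_fib_members fib_members fib_members_alt
  have hmap : (fun x => PySem.Set.contains (fibLoopA n 0 1 PySem.Set.empty (by omega) (by omega)) x)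
      = (fun x => chainMem n 0 1 x (by omega) (by omega)) := by
    funext x
    rw [contains_fibLoopA n ((n + 1 - 0).toNat + (n + 1 - 1).toNat) 0 1 _ x _ _ rfl]
    simp [PySem.Set.empty, PySem.Set.contains]
  show (PySem.List.pyRange 0 (n + 1) 1).map
      (fun x => PySem.Set.contains (fibLoopA n 0 1 PySem.Set.empty (by omega) (by omega)) x) = _
  rw [hmap]
  by_cases h0 : n < 0
  · rw [dif_pos h0, PySem.List.pyRange_one_eq_nil (by omega), List.map_nil]
  · rw [dif_neg h0]
    by_cases h1 : n = 0
    · subst h1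
      rw [dif_pos rfl]
      rw [PySem.List.pyRange_one_cons (by omega),
        PySem.List.pyRange_one_eq_nil (by omega), List.map_cons, List.map_nil]
      rw [chainMem, dif_pos (by omega)]
      simp
    · rw [dif_neg h1]
      rw [PySem.List.pyRange_one_cons (by omega), List.map_cons]
      congr 1
      · rw [chainMem, dif_pos (by omega)]; simp
      · rw [buildB_eq n (n - 1).toNat 1 2 (by omega) (by omega) (by omega) rfl]
        apply List.map_congr_left
        intro x hx
        rw [PySem.List.mem_pyRange_one] at hx
        -- chainMem n 0 1 x = chainMem n 1 1 x = chainMem n 1 2 x for 1 ≤ x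
        rw [chainMem, dif_pos (by omega : (0:Int) ≤ n)]
        rw [show ((x == (0:Int)) = false) by simp; omega, Bool.false_or]
        have h2 : (1:Int) ≤ n := by omega
        -- goal: chainMem n 1 (0+1) x = chainMem n 1 2 x
        rw [chainMem_congr n 1 1 (0+1) 1 x (by omega) (by omega) (by omega) (by omega)
          rfl (by norm_num)]
        -- goal: chainMem n 1 1 x = chainMem n 1 2 x
        by_cases hx1 : x = 1
        · subst hx1
          conv_lhs => rw [chainMem]
          rw [dif_pos h2]
          conv_rhs => rw [chainMem]
          rw [dif_pos h2]
          simp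
        · conv_lhs => rw [chainMem]
          rw [dif_pos h2, show (((x : Int) == 1) = false) by simp; omega, Bool.false_or]
          -- goal: chainMem n 1 (1+1) x = chainMem n 1 2 x
          exact chainMem_congr n 1 1 (1+1) 2 x (by omega) (by omega) (by omega) (by omega)
            rfl (by norm_num)
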